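-- pv_equiv track=rewrite | github.com/Z-Lighthouse/RELY | src/logic_isolation_template_library/utils.py | remove_module_from_lines
-- ===== SOURCE A (Python) =====
-- def remove_module_from_lines(file_lines, module_name):
--     result = []
--     inside_target_module = False
--
--     for line in file_lines:
--         if f"module {module_name}" in line:
--             inside_target_module = True
--             continue
--         if inside_target_module and "endmodule" in line:
--             inside_target_module = False
--             continue
--         if not inside_target_module:
--             result.append(line)
--     return result
-- ===== SOURCE B (Python) =====
-- def remove_module_from_lines(file_lines, module_name):
--     result = []
--     opener = f"module {module_name}"
--     it = iter(file_lines)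
--     for line in it:
--         if opener in line:
--             for inner in it:
--                 if opener in inner:
--                     continue
--                 if "endmodule" in inner:
--                     break
--         else:
--             result.append(line)
--     return result
-- ===== Notes on version B (the rewrite author's own statement) =====
-- stated objective: faster
-- what changed: Replaces the per-line boolean-flag state machine by an outer loop over an explicit iterator with a nested inner loop that consumes the module block, and builds the opener string once instead of formatting an f-string for every line.
import Mathlib
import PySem

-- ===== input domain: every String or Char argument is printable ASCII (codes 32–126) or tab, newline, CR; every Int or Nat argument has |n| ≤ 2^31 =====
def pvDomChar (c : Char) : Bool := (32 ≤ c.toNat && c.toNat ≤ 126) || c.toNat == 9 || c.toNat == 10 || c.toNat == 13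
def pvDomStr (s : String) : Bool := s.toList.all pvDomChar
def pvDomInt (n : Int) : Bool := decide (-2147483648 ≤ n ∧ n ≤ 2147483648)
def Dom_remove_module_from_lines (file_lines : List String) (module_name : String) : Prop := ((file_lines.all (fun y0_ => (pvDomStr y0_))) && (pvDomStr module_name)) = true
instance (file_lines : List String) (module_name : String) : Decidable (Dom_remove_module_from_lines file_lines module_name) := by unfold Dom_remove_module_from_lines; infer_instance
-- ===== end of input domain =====

-- B replaces A's per-line boolean-flag state machine by an outer loop with a nested
-- inner loop that consumes the module block up to its "endmodule" line (alternative decomposition).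

-- ===== PORT A =====
-- A's for-loop over (result, inside_target_module) as structural recursion on the lines.
def removeA_go (module_name : String) : List String → Bool → List String
  | [], _ => []
  | line :: rest, inside =>
    if PySem.Str.isIn ("module " ++ module_name) line then
      removeA_go module_name rest true
    else if inside && PySem.Str.isIn "endmodule" line then
      removeA_go module_name rest false
    else if !inside then
      line :: removeA_go module_name rest inside
    else
      removeA_go module_name rest inside

def remove_module_from_lines (file_lines : List String) (module_name : String) : List String :=
  removeA_go module_name file_lines false

-- ===== PORT B =====
-- B's inner consuming loop: discard lines until one containing "endmodule" (the opener re-match is skipped first).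
mutual
def removeB_inner (module_name : String) : List String → List String
  | [] => []
  | inner :: rest =>
    if PySem.Str.isIn ("module " ++ module_name) inner then
      removeB_inner module_name rest
    else if PySem.Str.isIn "endmodule" inner then
      removeB_outer module_name rest
    else
      removeB_inner module_name rest

-- B's outer loop over the explicit iterator.
def removeB_outer (module_name : String) : List String → List String
  | [] => []
  | line :: rest =>
    if PySem.Str.isIn ("module " ++ module_name) line then
      removeB_inner module_name rest
    else
      line :: removeB_outer module_name rest
end

def remove_module_from_lines_alt (file_lines : List String) (module_name : String) : List String :=
  removeB_outer module_name file_lines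

-- ===== PRECONDITION & SPEC =====
def Spec_remove_module_from_lines (file_lines : List String) (module_name : String) (out : List String) : Prop := out = remove_module_from_lines_alt file_lines module_name
instance (file_lines : List String) (module_name : String) (out : List String) : Decidable (Spec_remove_module_from_lines file_lines module_name out) := by unfold Spec_remove_module_from_lines; infer_instance

-- ===== CLAIM (what is proved, stated in full; the proofs are below) =====
def Claim_equal_remove_module_from_lines : Prop := ∀ (file_lines : List String) (module_name : String), Dom_remove_module_from_lines file_lines module_name → Spec_remove_module_from_lines file_lines module_name (remove_module_from_lines file_lines module_name)

-- ===== LEMMAS AND PROOFS =====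

-- A's loop in state `inside = false` is B's outer loop, and in state `inside = true` it is B's inner loop.
theorem removeA_go_eq (module_name : String) (lines : List String) :
    removeA_go module_name lines false = removeB_outer module_name lines ∧
    removeA_go module_name lines true = removeB_inner module_name lines := by
  induction lines with
  | nil => exact ⟨rfl, rfl⟩
  | cons line rest ih =>
    constructor <;> simp only [removeA_go, removeB_outer, removeB_inner] <;>
      split_ifs <;> simp_all

-- ===== VERDICT (by name: the statement is the Claim_ definition above) =====
theorem remove_module_from_lines_spec : Claim_equal_remove_module_from_lines := by
  intro file_lines module_name _
  unfold Spec_remove_module_from_lines remove_module_from_lines remove_module_from_lines_alt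
  exact (removeA_go_eq module_name file_lines).1
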